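-- pv_equiv track=rewrite | github.com/agb94/astor | extract_features.py | analyzer
-- ===== SOURCE A (Python) =====
-- def analyzer(s):
--     tokens = list()
--     token = ''
--     for c in s:
--         if not c.isalnum():
--             if token:
--                 tokens.append(token)
--                 token = ''
--             if c != ' ':
--                 tokens.append(c)
--             continue
--         token += c
--     return tokens
-- ===== SOURCE B (Python) =====
-- def analyzer(s):
--     # Separator-driven tokenizer: a token is a maximal alphanumeric run
--     # terminated by a separator (any non-alphanumeric character).  Repeatedly
--     # find the next separator, emit the slice before it (if non-empty) and the
--     # separator itself (unless it is a space), then continue after it.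
--     out = []
--     while True:
--         i = next((j for j, c in enumerate(s) if not c.isalnum()), -1)
--         if i == -1:
--             return out
--         if i > 0:
--             out.append(s[:i])
--         if s[i] != ' ':
--             out.append(s[i])
--         s = s[i + 1:]
-- ===== Notes on version B (the rewrite author's own statement) =====
-- stated objective: alternative
-- what changed: B is a separator-driven tokenizer: it repeatedly finds the next non-alphanumeric character, emits the slice before it and the separator itself (unless a space), and continues on the remaining suffix, replacing A's char-by-char buffer-and-flush state machine with find-and-slice iteration.
import Mathlib
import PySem

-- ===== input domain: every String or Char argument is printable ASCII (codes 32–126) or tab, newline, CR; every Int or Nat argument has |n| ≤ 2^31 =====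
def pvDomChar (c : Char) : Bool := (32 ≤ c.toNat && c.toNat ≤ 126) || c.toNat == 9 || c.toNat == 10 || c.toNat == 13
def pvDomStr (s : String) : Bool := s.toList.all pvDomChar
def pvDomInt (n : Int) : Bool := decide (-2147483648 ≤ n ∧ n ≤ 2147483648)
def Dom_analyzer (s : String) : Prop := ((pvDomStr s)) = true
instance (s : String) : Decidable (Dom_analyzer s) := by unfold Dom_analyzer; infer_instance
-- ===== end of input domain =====

-- B replaces A's char-by-char buffer-and-flush state machine with a find-the-next-
-- separator-and-slice loop; objective: alternative decomposition, no speed claim.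

-- ===== PORT A =====
def analyzerLoop : List Char → List String → String → List String
  | [], tokens, _token => tokens
  | c :: cs, tokens, token =>
    if !(PySem.Chars.isalnum c) then
      -- `if token:` flush, then `if c != ' ':` append the separator
      let p := if token ≠ "" then (tokens ++ [token], "") else (tokens, token)
      let tokens' := if c ≠ ' ' then p.1 ++ [String.ofList [c]] else p.1
      analyzerLoop cs tokens' p.2
    else
      analyzerLoop cs tokens (token.push c)

def analyzer (s : String) : List String := analyzerLoop s.toList [] ""

-- ===== PORT B =====
-- B's while-loop: find the index of the next separator (first non-alnum char);
-- if there is none, return `out`; else emit the slice before it and the separator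
-- itself (unless a space), and continue on the suffix after it.
def analyzerAltGo (cs : List Char) (out : List String) : List String :=
  match h : cs.findIdx? (fun c => !(PySem.Chars.isalnum c)) with
  | none => out
  | some i =>
      let out1 := if 0 < i then out ++ [String.ofList (cs.take i)] else out
      let d := cs.getD i ' '   -- `s[i]`; in range by findIdx?, so getD is exact
      let out2 := if d ≠ ' ' then out1 ++ [String.ofList [d]] else out1
      analyzerAltGo (cs.drop (i + 1)) out2
termination_by cs.length
decreasing_by
  rcases List.findIdx?_eq_some_iff_getElem.mp h with ⟨hi, -, -⟩
  simp only [List.length_drop]; omega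

def analyzer_alt (s : String) : List String := analyzerAltGo s.toList []

-- ===== PRECONDITION & SPEC =====
def Spec_analyzer (s : String) (out : List String) : Prop := out = analyzer_alt s
instance (s : String) (out : List String) : Decidable (Spec_analyzer s out) := by unfold Spec_analyzer; infer_instance

-- ===== CLAIM (what is proved, stated in full; the proofs are below) =====
def Claim_equal_analyzer : Prop := ∀ (s : String), Dom_analyzer s → Spec_analyzer s (analyzer s)

-- ===== LEMMAS AND PROOFS =====

-- A's loop with the accumulator factored out (token kept as a char list)
def specF : List Char → List Char → List String
  | [], _ => []
  | c :: cs, tok =>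
    if PySem.Chars.isalnum c then specF cs (tok ++ [c])
    else (if tok ≠ [] then [String.ofList tok] else []) ++
         (if c ≠ ' ' then [String.ofList [c]] else []) ++ specF cs []

theorem loop_spec (cs : List Char) : ∀ (tokens : List String) (token : String),
    analyzerLoop cs tokens token = tokens ++ specF cs token.toList := by
  induction cs with
  | nil => intro tokens token; simp [analyzerLoop, specF]
  | cons c cs ih =>
    intro tokens token
    by_cases hk : PySem.Chars.isalnum c
    · simp [analyzerLoop, specF, hk, ih]
    · by_cases ht : token = "" <;>
        simp [analyzerLoop, specF, hk, ht, ih, String.ofList_toList,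
          show token.toList = [] ↔ token = "" from by
            constructor <;> intro h
            · simpa using congrArg String.ofList h
            · simp [h]] <;>
        split_ifs <;> simp_all

-- an all-alnum prefix only grows the buffer
theorem specF_alnum_prefix (p : List Char) : ∀ (cs : List Char) (tok : List Char),
    (∀ c ∈ p, PySem.Chars.isalnum c = true) → specF (p ++ cs) tok = specF cs (tok ++ p) := by
  induction p with
  | nil => intro cs tok _; simp
  | cons c p ih =>
    intro cs tok hall
    have hc : PySem.Chars.isalnum c = true := hall c (by simp)
    simp only [List.cons_append, specF, hc, if_pos]
    rw [ih cs (tok ++ [c]) (fun d hd => hall d (by simp [hd]))]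
    simp

theorem altGo_none (cs : List Char) (out : List String)
    (h : cs.findIdx? (fun c => !(PySem.Chars.isalnum c)) = none) :
    analyzerAltGo cs out = out := by
  rw [analyzerAltGo.eq_def]
  split
  · rfl
  · simp_all

theorem altGo_some (cs : List Char) (i : Nat) (out : List String)
    (h : cs.findIdx? (fun c => !(PySem.Chars.isalnum c)) = some i) :
    analyzerAltGo cs out =
      analyzerAltGo (cs.drop (i + 1))
        (if cs.getD i ' ' ≠ ' '
         then (if 0 < i then out ++ [String.ofList (cs.take i)] else out) ++ [String.ofList [cs.getD i ' ']]
         else (if 0 < i then out ++ [String.ofList (cs.take i)] else out)) := by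
  rw [analyzerAltGo.eq_def]
  split
  · simp_all
  · rename_i i' heq
    rw [h] at heq
    cases heq
    rfl

theorem altGo_acc (n : Nat) : ∀ (cs : List Char), cs.length ≤ n → ∀ (out : List String),
    analyzerAltGo cs out = out ++ analyzerAltGo cs [] := by
  induction n with
  | zero =>
    intro cs hcs out
    have : cs = [] := by cases cs <;> simp_all
    subst this
    rw [altGo_none [] out rfl, altGo_none [] [] rfl]
    simp
  | succ n ih =>
    intro cs hcs out
    cases hf : cs.findIdx? (fun c => !(PySem.Chars.isalnum c)) with
    | none => rw [altGo_none _ _ hf, altGo_none _ _ hf]; simp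
    | some i =>
      rcases List.findIdx?_eq_some_iff_getElem.mp hf with ⟨hi, -, -⟩
      have hlen : (cs.drop (i + 1)).length ≤ n := by simp; omega
      rw [altGo_some _ _ _ hf, altGo_some _ _ _ hf]
      split_ifs <;> (conv_lhs => rw [ih _ hlen]) <;> (conv_rhs => rw [ih _ hlen]) <;> simp

theorem specF_eq_altGo (n : Nat) : ∀ (cs : List Char), cs.length ≤ n →
    specF cs [] = analyzerAltGo cs [] := by
  induction n with
  | zero =>
    intro cs hcs
    have : cs = [] := by cases cs <;> simp_all
    subst this
    rw [altGo_none [] [] rfl]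
    rfl
  | succ n ih =>
    intro cs hcs
    cases hf : cs.findIdx? (fun c => !(PySem.Chars.isalnum c)) with
    | none =>
      -- no separator: every char is alnum, A's buffer is never flushed
      have hall : ∀ c ∈ cs, PySem.Chars.isalnum c = true := by
        intro c hc
        have := List.findIdx?_eq_none_iff.mp hf c hc
        simpa using this
      have : specF (cs ++ []) [] = specF [] ([] ++ cs) := specF_alnum_prefix cs [] [] hall
      rw [altGo_none _ _ hf]
      simpa [specF] using this
    | some i =>
      rcases List.findIdx?_eq_some_iff_getElem.mp hf with ⟨hi, hp, hlt⟩
      have hsep : PySem.Chars.isalnum cs[i] = false := by simpa using hp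
      have htake : ∀ c ∈ cs.take i, PySem.Chars.isalnum c = true := by
        intro c hc
        rw [List.mem_take_iff_getElem] at hc
        obtain ⟨j, hj, rfl⟩ := hc
        have := hlt j (by omega)
        simpa using this
      have hdec : cs = cs.take i ++ cs[i] :: cs.drop (i + 1) := by
        conv_lhs => rw [← List.take_append_drop i cs]
        rw [List.drop_eq_getElem_cons hi]
      have hL : specF cs [] =
          (if 0 < i then [String.ofList (cs.take i)] else []) ++
          (if cs[i] ≠ ' ' then [String.ofList [cs[i]]] else []) ++ specF (cs.drop (i + 1)) [] := by
        conv_lhs => rw [hdec]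
        rw [specF_alnum_prefix _ _ _ htake]
        simp only [List.nil_append, specF, hsep, Bool.false_eq_true, if_false]
        have hne : cs.take i ≠ [] ↔ 0 < i := by
          rw [← List.length_pos_iff, List.length_take]; omega
        by_cases h0 : 0 < i <;> simp [hne, h0]
      have hlen : (cs.drop (i + 1)).length ≤ n := by simp; omega
      rw [hL, altGo_some _ _ _ hf, altGo_acc ((cs.drop (i + 1)).length) _ le_rfl, ← ih _ hlen,
        List.getD_eq_getElem cs ' ' hi]
      split_ifs <;> simp

-- ===== VERDICT (by name: the statement is the Claim_ definition above) =====
theorem analyzer_spec : Claim_equal_analyzer := by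
  intro s _
  unfold Spec_analyzer analyzer analyzer_alt
  rw [loop_spec, show ("" : String).toList = [] from rfl,
    specF_eq_altGo s.toList.length _ le_rfl]
  rfl
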